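-- pv_equiv track=rewrite | github.com/chshersh/university-courses | math-logic-course/deduction/main.py | term_skip
-- ===== SOURCE A (Python) =====
-- def term_skip(state, stop_character):
--     pos = 0
--     while pos < len(state):
--         if state[pos] == stop_character: return pos
--         if state[pos] == '(':
--             pos, balance = pos + 1, 1
--             while pos < len(state) and balance > 0:
--                 balance += state[pos] == '(' and 1 or state[pos] == ')' and -1 or 0
--                 pos += 1
--         else: pos += 1
--     return 0  # can't stop at zero position
-- ===== SOURCE B (Python) =====
-- def term_skip(state, stop_character):
--     depth = 0
--     for pos, ch in enumerate(state):
--         if depth == 0 and ch == stop_character: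
--             return pos
--         if ch == '(':
--             depth += 1
--         elif ch == ')' and depth > 0:
--             depth -= 1
--     return 0
-- ===== Notes on version B (the rewrite author's own statement) =====
-- stated objective: simpler
-- what changed: Replaces A's nested inner while-loop that rescans each parenthesized group with a single flat pass maintaining a running depth counter (stop checked only at depth 0, ')' decrement clamped at 0).
import Mathlib
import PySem

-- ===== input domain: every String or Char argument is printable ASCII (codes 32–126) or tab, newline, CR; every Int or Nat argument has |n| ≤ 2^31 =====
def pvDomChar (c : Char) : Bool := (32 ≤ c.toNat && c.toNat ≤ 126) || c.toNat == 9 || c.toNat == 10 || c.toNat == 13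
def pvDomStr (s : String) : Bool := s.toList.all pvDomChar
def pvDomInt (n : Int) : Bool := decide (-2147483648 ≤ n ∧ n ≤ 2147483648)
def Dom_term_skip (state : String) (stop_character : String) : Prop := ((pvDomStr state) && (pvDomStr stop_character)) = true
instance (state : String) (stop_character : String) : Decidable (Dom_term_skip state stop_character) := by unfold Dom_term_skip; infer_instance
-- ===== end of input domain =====

-- B replaces A's nested inner skip loop with one flat pass over the characters
-- keeping a running paren-depth counter (objective: simpler).

-- ===== PORT A =====
-- inner while loop: 'while pos < len(state) and balance > 0: balance += …; pos += 1'
def tsInner (cs : List Char) (pos : Nat) (balance : Int) : Nat :=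
  if h : pos < cs.length ∧ balance > 0 then
    tsInner cs (pos + 1)
      (balance + (if cs[pos]'h.1 = '(' then 1 else if cs[pos]'h.1 = ')' then -1 else 0))
  else pos
termination_by cs.length - pos

theorem tsInner_ge (cs : List Char) (pos : Nat) (balance : Int) :
    pos ≤ tsInner cs pos balance := by
  unfold tsInner
  split
  · exact le_trans (Nat.le_succ pos) (tsInner_ge cs (pos + 1) _)
  · exact le_refl pos
termination_by cs.length - pos

-- outer while loop of A
def tsOuter (cs : List Char) (stop : String) (pos : Nat) : Int :=
  if h : pos < cs.length then
    if String.ofList [cs[pos]'h] = stop then (pos : Int)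
    else if cs[pos]'h = '(' then tsOuter cs stop (tsInner cs (pos + 1) 1)
    else tsOuter cs stop (pos + 1)
  else 0
termination_by cs.length - pos
decreasing_by
  · have := tsInner_ge cs (pos + 1) 1; omega
  · omega

def term_skip (state : String) (stop_character : String) : Int :=
  tsOuter state.toList stop_character 0

-- ===== PORT B =====
-- single pass with a running depth counter
def altGo (stop : String) : List Char → Nat → Nat → Int
  | [], _, _ => 0
  | c :: rest, pos, depth =>
    if depth = 0 ∧ String.ofList [c] = stop then (pos : Int)
    else if c = '(' then altGo stop rest (pos + 1) (depth + 1)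
    else if c = ')' ∧ depth > 0 then altGo stop rest (pos + 1) (depth - 1)
    else altGo stop rest (pos + 1) depth

def term_skip_alt (state : String) (stop_character : String) : Int :=
  altGo stop_character state.toList 0 0

-- ===== PRECONDITION & SPEC =====
def Spec_term_skip (state : String) (stop_character : String) (out : Int) : Prop := out = term_skip_alt state stop_character
instance (state : String) (stop_character : String) (out : Int) : Decidable (Spec_term_skip state stop_character out) := by unfold Spec_term_skip; infer_instance

-- ===== CLAIM (what is proved, stated in full; the proofs are below) =====
def Claim_equal_term_skip : Prop := ∀ (state : String) (stop_character : String), Dom_term_skip state stop_character → Spec_term_skip state stop_character (term_skip state stop_character)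

-- ===== LEMMAS AND PROOFS =====

theorem tsInner_le (cs : List Char) (pos : Nat) (balance : Int) (h : pos ≤ cs.length) :
    tsInner cs pos balance ≤ cs.length := by
  unfold tsInner
  split
  · next hc => exact tsInner_le cs (pos + 1) _ hc.1
  · exact h
termination_by cs.length - pos

-- the flat pass at positive depth agrees with A's inner skip loop followed by depth 0
theorem altGo_inner (cs : List Char) (stop : String) (pos : Nat) (b : Int) (hb : 0 < b) :
    altGo stop (cs.drop pos) pos b.toNat
      = altGo stop (cs.drop (tsInner cs pos b)) (tsInner cs pos b) 0 := by
  by_cases hp : pos < cs.length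
  · rw [List.drop_eq_getElem_cons hp]
    rw [altGo, if_neg (fun hc => (by omega : ¬ b.toNat = 0) hc.1)]
    rw [tsInner, dif_pos ⟨hp, hb⟩]
    by_cases h1 : cs[pos] = '('
    · rw [if_pos h1, if_pos h1]
      have ht : (b + 1).toNat = b.toNat + 1 := by omega
      rw [← ht, altGo_inner cs stop (pos + 1) (b + 1) (by omega)]
    · rw [if_neg h1, if_neg h1]
      by_cases h2 : cs[pos] = ')'
      · rw [if_pos h2, if_pos ⟨h2, by omega⟩]
        by_cases hb1 : b = 1
        · subst hb1
          have h0 : tsInner cs (pos + 1) (1 + -1) = pos + 1 := by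
            rw [tsInner]; simp
          rw [h0]; norm_num
        · have ht : (b + -1).toNat = b.toNat - 1 := by omega
          rw [← ht, altGo_inner cs stop (pos + 1) (b + -1) (by omega)]
      · rw [if_neg h2, if_neg (fun hc => h2 hc.1)]
        rw [show b + 0 = b from by ring, altGo_inner cs stop (pos + 1) b hb]
  · have hdrop : cs.drop pos = [] := List.drop_eq_nil_of_le (by omega)
    have hI : tsInner cs pos b = pos := by rw [tsInner]; simp [hp]
    rw [hI, hdrop, altGo, altGo]
termination_by cs.length - pos

theorem tsOuter_eq_altGo (cs : List Char) (stop : String) (pos : Nat) (h : pos ≤ cs.length) :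
    tsOuter cs stop pos = altGo stop (cs.drop pos) pos 0 := by
  by_cases hp : pos < cs.length
  · rw [List.drop_eq_getElem_cons hp, tsOuter, dif_pos hp, altGo]
    by_cases hs : String.ofList [cs[pos]] = stop
    · rw [if_pos hs, if_pos ⟨rfl, hs⟩]
    · rw [if_neg hs,
          if_neg (show ¬((0 : Nat) = 0 ∧ String.ofList [cs[pos]] = stop) from fun hc => hs hc.2)]
      by_cases h1 : cs[pos] = '('
      · rw [if_pos h1, if_pos h1]
        have h1n : (0 : Nat) + 1 = (1 : Int).toNat := rfl
        rw [h1n, altGo_inner cs stop (pos + 1) 1 (by norm_num)]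
        exact tsOuter_eq_altGo cs stop (tsInner cs (pos + 1) 1) (tsInner_le cs (pos + 1) 1 hp)
      · rw [if_neg h1, if_neg h1,
            if_neg (show ¬(cs[pos] = ')' ∧ 0 > 0) from fun hc => Nat.lt_irrefl 0 hc.2)]
        exact tsOuter_eq_altGo cs stop (pos + 1) hp
  · have hdrop : cs.drop pos = [] := List.drop_eq_nil_of_le (by omega)
    rw [hdrop, tsOuter, altGo]
    simp [hp]
termination_by cs.length - pos
decreasing_by
  · have := tsInner_ge cs (pos + 1) 1; omega
  · omega

-- ===== VERDICT (by name: the statement is the Claim_ definition above) =====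
theorem term_skip_spec : Claim_equal_term_skip := by
  intro state stop _
  unfold Spec_term_skip term_skip term_skip_alt
  simpa using tsOuter_eq_altGo state.toList stop 0 (Nat.zero_le _)
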